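-- pv_equiv track=rewrite | github.com/ytakata69/icpc | 2023/b.py | solve
-- ===== SOURCE A (Python) =====
-- def update(p, h):
--     return p - 1 if h == p - 1 else (p + 1 if h == p else p)
--
-- def result(x, p, vpos = -1, hpos = 0):
--     for i, xi in enumerate(x):
--         if i == vpos:
--             p = update(p, hpos)
--         p = update(p, xi)
--
--     if len(x) == vpos:
--         p = update(p, hpos)
--     return p
--
-- def solve(n, x, p, q):
--     if result(x, p) == q:
--         return "OK"
--     for vpos in range(len(x) + 1):  # 0..m
--         for hpos in range(1, n):    # 1..n-1
--             if result(x, p, vpos, hpos) == q: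
--                 return f"{hpos} {vpos}"
--     return "NG"
-- ===== SOURCE B (Python) =====
-- def _step(p, h):
--     if h == p - 1:
--         return p - 1
--     if h == p:
--         return p + 1
--     return p
--
-- def _run(s, xs):
--     for xi in xs:
--         s = _step(s, xi)
--     return s
--
-- def _search(n, xs, c, q, vpos):
--     # only inserting h == c-1 or h == c changes the state at this point,
--     # so at most two candidate horizontal positions per vpos
--     for h in (c - 1, c):
--         if 1 <= h < n and _run(_step(c, h), xs) == q:
--             return f"{h} {vpos}"
--     if not xs:
--         return None
--     return _search(n, xs[1:], _step(c, xs[0]), q, vpos + 1)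
--
-- def solve(n, x, p, q):
--     if _run(p, x) == q:
--         return "OK"
--     ans = _search(n, x, p, q, 0)
--     return ans if ans is not None else "NG"
-- ===== Notes on version B (the rewrite author's own statement) =====
-- stated objective: faster
-- what changed: Instead of trying every horizontal position 1..n-1 at each insertion point, B carries the prefix state down a recursion and tests only the two horizontal positions (state-1 and state) that can change the state, simulating the suffix for those; at most 2 simulations per insertion point instead of n-1.
import Mathlib
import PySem

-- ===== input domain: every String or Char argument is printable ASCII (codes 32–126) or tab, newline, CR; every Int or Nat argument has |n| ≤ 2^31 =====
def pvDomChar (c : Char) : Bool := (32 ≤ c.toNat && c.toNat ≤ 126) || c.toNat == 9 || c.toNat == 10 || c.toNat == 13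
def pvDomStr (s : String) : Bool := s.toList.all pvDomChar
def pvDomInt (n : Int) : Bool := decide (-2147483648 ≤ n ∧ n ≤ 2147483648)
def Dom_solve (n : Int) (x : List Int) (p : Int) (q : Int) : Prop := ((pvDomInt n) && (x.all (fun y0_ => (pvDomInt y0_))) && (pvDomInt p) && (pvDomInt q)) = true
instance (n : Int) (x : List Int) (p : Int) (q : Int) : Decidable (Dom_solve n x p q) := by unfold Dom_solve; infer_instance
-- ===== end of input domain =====

-- B replaces A's inner scan over all horizontal positions 1..n-1 by a recursion that carries the
-- prefix state and tests only the two candidate positions that can change it (objective: faster).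

-- ===== PORT A =====
def update (p h : Int) : Int := if h = p - 1 then p - 1 else if h = p then p + 1 else p

def resultGo (vpos hpos : Int) : List Int → Int → Int → Int
  | [], p, _ => p
  | xi :: rest, p, i =>
      let p' := if i = vpos then update p hpos else p
      resultGo vpos hpos rest (update p' xi) (i + 1)

def resultA (x : List Int) (p : Int) (vpos : Int) (hpos : Int) : Int :=
  let p' := resultGo vpos hpos x p 0
  if (x.length : Int) = vpos then update p' hpos else p'

def innerA (x : List Int) (p q vpos : Int) : List Int → Option String
  | [] => none
  | h :: rest =>
      if resultA x p vpos h = q then some (PySem.Int.toStr h ++ " " ++ PySem.Int.toStr vpos)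
      else innerA x p q vpos rest

def outerA (n : Int) (x : List Int) (p q : Int) : List Int → Option String
  | [] => none
  | v :: rest =>
      match innerA x p q v (PySem.List.pyRange 1 n 1) with
      | some s => some s
      | none => outerA n x p q rest

def solve (n : Int) (x : List Int) (p : Int) (q : Int) : String :=
  if resultA x p (-1) 0 = q then "OK"
  else
    match outerA n x p q (PySem.List.pyRange 0 ((x.length : Int) + 1) 1) with
    | some s => s
    | none => "NG"

-- ===== PORT B =====
def step (p h : Int) : Int := if h = p - 1 then p - 1 else if h = p then p + 1 else p

def runB (s : Int) : List Int → Int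
  | [] => s
  | xi :: rest => runB (step s xi) rest

-- the two-candidate check 'for h in (c-1, c): …' of Source B's _search
def candB (n q : Int) (xs : List Int) (c vpos : Int) : Option String :=
  if 1 ≤ c - 1 ∧ c - 1 < n ∧ runB (step c (c - 1)) xs = q then
    some (PySem.Int.toStr (c - 1) ++ " " ++ PySem.Int.toStr vpos)
  else if 1 ≤ c ∧ c < n ∧ runB (step c c) xs = q then
    some (PySem.Int.toStr c ++ " " ++ PySem.Int.toStr vpos)
  else none

def searchB (n q : Int) : List Int → Int → Int → Option String
  | [], c, vpos =>
      (match candB n q [] c vpos with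
       | some s => some s
       | none => none)
  | xi :: rest, c, vpos =>
      (match candB n q (xi :: rest) c vpos with
       | some s => some s
       | none => searchB n q rest (step c xi) (vpos + 1))

def solve_alt (n : Int) (x : List Int) (p : Int) (q : Int) : String :=
  if runB p x = q then "OK"
  else
    match searchB n q x p 0 with
    | some s => s
    | none => "NG"

-- ===== PRECONDITION & SPEC =====
def Spec_solve (n : Int) (x : List Int) (p : Int) (q : Int) (out : String) : Prop := out = solve_alt n x p q
instance (n : Int) (x : List Int) (p : Int) (q : Int) (out : String) : Decidable (Spec_solve n x p q out) := by unfold Spec_solve; infer_instance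

-- ===== CLAIM (what is proved, stated in full; the proofs are below) =====
def Claim_equal_solve : Prop := ∀ (n : Int) (x : List Int) (p : Int) (q : Int), Dom_solve n x p q → Spec_solve n x p q (solve n x p q)

-- ===== LEMMAS AND PROOFS =====
theorem go_succ (h : Int) : ∀ (xs : List Int) (p i v : Int),
    resultGo (v + 1) h xs p (i + 1) = resultGo v h xs p i := by
  intro xs
  induction xs with
  | nil => intro p i v; rfl
  | cons xi rest ih =>
      intro p i v
      simp only [resultGo, add_left_inj]
      exact ih _ _ _

theorem go_neg (h : Int) : ∀ (xs : List Int) (p i v : Int), v < i →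
    resultGo v h xs p i = runB p xs := by
  intro xs
  induction xs with
  | nil => intro p i v _; rfl
  | cons xi rest ih =>
      intro p i v hvi
      simp only [resultGo, runB, if_neg (by omega : ¬ i = v)]
      exact ih _ _ _ (by omega)

theorem resultA_plain (x : List Int) (p : Int) : resultA x p (-1) 0 = runB p x := by
  unfold resultA
  rw [go_neg 0 x p 0 (-1) (by omega), if_neg (by omega : ¬ ((x.length : Int) = -1))]

theorem runB_append (a b : List Int) (p : Int) : runB p (a ++ b) = runB (runB p a) b := by
  induction a generalizing p with
  | nil => rfl
  | cons xi rest ih => simp only [List.cons_append, runB]; exact ih _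

theorem decomp (x : List Int) (p h : Int) : ∀ (v : Nat), v ≤ x.length →
    resultA x p (v : Int) h = runB (step (runB p (x.take v)) h) (x.drop v) := by
  induction x generalizing p with
  | nil =>
      intro v hv
      have hv0 : v = 0 := by simpa using hv
      subst hv0
      simp [resultA, resultGo, runB, update, step]
  | cons xi rest ih =>
      intro v hv
      cases v with
      | zero =>
          have h1 : resultGo 0 h (xi :: rest) p 0 = runB (update (update p h) xi) rest := by
            have h2 := go_neg h rest (update (update p h) xi) (0 + 1) 0 (by omega)
            simpa [resultGo] using h2
          simp only [Nat.cast_zero, resultA]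
          rw [h1, if_neg (by push_cast [List.length_cons]; omega : ¬ (((xi :: rest).length : Int) = 0))]
          simp [runB, update, step]
      | succ v =>
          have hstep : resultA (xi :: rest) p ((v + 1 : Nat) : Int) h
              = resultA rest (update p xi) (v : Int) h := by
            unfold resultA
            push_cast
            simp only [resultGo]
            rw [if_neg (by omega : ¬ ((0 : Int) = (v : Int) + 1)),
              show (0:Int) + 1 = 0 + 1 from rfl, go_succ]
            simp only [List.length_cons, Nat.cast_add, Nat.cast_one, add_left_inj]
          rw [hstep, ih (update p xi) v (by simp at hv; omega)]
          simp [List.take_succ_cons, List.drop_succ_cons, runB, update, step]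

theorem inner_two (x : List Int) (p q v c : Int) (sfx : List Int)
    (hdec : ∀ h, resultA x p v h = runB (step c h) sfx)
    (hne : runB c sfx ≠ q) :
    ∀ l : List Int, l.Pairwise (· < ·) →
      innerA x p q v l =
        (if (c - 1) ∈ l ∧ runB (step c (c - 1)) sfx = q then
           some (PySem.Int.toStr (c - 1) ++ " " ++ PySem.Int.toStr v)
         else if c ∈ l ∧ runB (step c c) sfx = q then
           some (PySem.Int.toStr c ++ " " ++ PySem.Int.toStr v)
         else none) := by
  intro l hl
  induction l with
  | nil => simp [innerA]
  | cons h0 rest ihl =>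
      have hlt : ∀ y ∈ rest, h0 < y := (List.pairwise_cons.mp hl).1
      have hrest := (List.pairwise_cons.mp hl).2
      simp only [innerA]
      rw [hdec h0, ihl hrest]
      by_cases e1 : h0 = c - 1
      · subst e1
        by_cases hq : runB (step c (c - 1)) sfx = q
        · simp [hq]
        · simp [hq, List.mem_cons, show ¬(c = c - 1) from by omega]
      · by_cases e2 : h0 = c
        · subst e2
          have f1 : h0 - 1 ∉ rest := fun hc => by have := hlt _ hc; omega
          have f2 : h0 ∉ rest := fun hc => by have := hlt _ hc; omega
          by_cases hq : runB (step h0 h0) sfx = q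
          · simp [hq, List.mem_cons, f1, f2, show ¬(h0 - 1 = h0) from by omega]
          · simp [hq, List.mem_cons, f1, f2, show ¬(h0 - 1 = h0) from by omega]
        · have hstep0 : step c h0 = c := by
            unfold step
            rw [if_neg (by omega : ¬ (h0 = c - 1)), if_neg e2]
          rw [hstep0, if_neg hne]
          simp [List.mem_cons, show ¬(c - 1 = h0) from by omega,
            show ¬(c = h0) from fun hc => e2 hc.symm]

theorem inner_cand (n : Int) (x : List Int) (p q v c : Int) (sfx : List Int)
    (hdec : ∀ h, resultA x p v h = runB (step c h) sfx)
    (hne : runB c sfx ≠ q) :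
    innerA x p q v (PySem.List.pyRange 1 n 1) = candB n q sfx c v := by
  rw [inner_two x p q v c sfx hdec hne _ (PySem.List.pairwise_lt_pyRange_one 1 n)]
  simp only [candB, PySem.List.mem_pyRange_one, and_assoc]

theorem main_loop (n : Int) (x : List Int) (p q : Int) (hne : runB p x ≠ q) :
    ∀ (k v : Nat), v ≤ x.length → x.length - v = k →
      outerA n x p q (PySem.List.pyRange (v : Int) ((x.length : Int) + 1) 1) =
        searchB n q (x.drop v) (runB p (x.take v)) (v : Int) := by
  intro k
  induction k with
  | zero =>
      intro v hv hk
      have hv' : v = x.length := by omega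
      subst hv'
      have hdec : ∀ h, resultA x p (x.length : Int) h = runB (step (runB p x) h) [] := by
        intro h
        have hd := decomp x p h x.length le_rfl
        rwa [List.take_length, List.drop_length] at hd
      have hne' : runB (runB p x) [] ≠ q := hne
      rw [List.drop_length, List.take_length]
      rw [PySem.List.pyRange_one_cons (by omega : ((x.length : Int) < (x.length : Int) + 1))]
      simp only [outerA]
      rw [inner_cand n x p q _ _ _ hdec hne']
      rw [show PySem.List.pyRange ((x.length : Int) + 1) ((x.length : Int) + 1) 1 = []
          from PySem.List.pyRange_one_eq_nil (by omega)]
      cases hcb : candB n q [] (runB p x) (x.length : Int) with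
      | some s => simp [searchB, hcb]
      | none => simp [searchB, hcb, outerA]
  | succ k ihk =>
      intro v hv hk
      have hvlt : v < x.length := by omega
      have hdec : ∀ h, resultA x p (v : Int) h = runB (step (runB p (x.take v)) h) (x.drop v) :=
        fun h => decomp x p h v (le_of_lt hvlt)
      have hne' : runB (runB p (x.take v)) (x.drop v) ≠ q := by
        rw [← runB_append, List.take_append_drop]; exact hne
      rw [PySem.List.pyRange_one_cons (by omega : ((v : Int) < (x.length : Int) + 1))]
      simp only [outerA]
      rw [inner_cand n x p q _ _ _ hdec hne']
      have hdropv : x.drop v = x[v] :: x.drop (v + 1) := List.drop_eq_getElem_cons hvlt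
      have htake : runB p (x.take (v + 1)) = step (runB p (x.take v)) x[v] := by
        have htk : x.take (v + 1) = x.take v ++ [x[v]] := by
          rw [← List.take_concat_get hvlt, List.concat_eq_append]
        rw [htk, runB_append]
        rfl
      have hrec := ihk (v + 1) (by omega) (by omega)
      push_cast at hrec ⊢
      rw [hdropv]
      simp only [searchB]
      cases hcb : candB n q (x[v] :: x.drop (v + 1)) (runB p (x.take v)) (v : Int) with
      | some s => rfl
      | none =>
          rw [htake] at hrec
          exact hrec

-- ===== VERDICT (by name: the statement is the Claim_ definition above) =====
theorem solve_spec : Claim_equal_solve := by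
  intro n x p q _
  unfold Spec_solve solve solve_alt
  rw [resultA_plain]
  by_cases hne : runB p x = q
  · simp [hne]
  · simp only [hne, if_false]
    have h0 := main_loop n x p q hne x.length 0 (by omega) (by omega)
    simp only [List.drop_zero, List.take_zero, Nat.cast_zero, runB] at h0
    rw [h0]
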